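-- pv_equiv track=rewrite | github.com/eidmaalouf89-spec/JANSA-VISASIST | jansa/adapters/ged/circuit_matrix.py | extract_lot_family
-- ===== SOURCE A (Python) =====
-- def extract_lot_family(lot_code: str) -> str:
--     """Extract lot family from GED lot code.
--
--     I003 → '03', A12B → '12B', G61A → '61A', I00B → '00B', B06B → '06B'
--     I012A → '12A', I013B → '13B', I016A → '16A'
--     """
--     if not lot_code or not isinstance(lot_code, str):
--         return None
--     raw = lot_code.strip()
--     # Strip building prefix (first char if I/A/B/H/G)
--     if raw and raw[0] in 'IABHG':
--         raw = raw[1:]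
--     if not raw:
--         return None
--     # Split into numeric prefix and alpha suffix:
--     # '012A' → prefix='012', suffix='A'
--     # '003'  → prefix='003', suffix=''
--     # '06B'  → prefix='06',  suffix='B'
--     # '00B'  → prefix='00',  suffix='B'
--     prefix = ''
--     suffix = ''
--     for i, c in enumerate(raw):
--         if c.isdigit():
--             prefix += c
--         else:
--             suffix = raw[i:]
--             break
--     # Strip leading zeros from numeric prefix, keep at least 2 digits
--     while len(prefix) > 2 and prefix[0] == '0' and prefix[1].isdigit():
--         prefix = prefix[1:]
--     return prefix + suffix
-- ===== SOURCE B (Python) =====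
-- def extract_lot_family(lot_code: str) -> str:
--     """Extract lot family: count leading digits and leading zeros, return one slice.
--
--     No prefix/suffix split and no string building: the answer is always a single
--     suffix slice of raw, starting after the zeros that may be dropped while
--     keeping at least 2 digits of the numeric run.
--     """
--     if not lot_code or not isinstance(lot_code, str):
--         return None
--     raw = lot_code.strip()
--     if raw and raw[0] in 'IABHG':
--         raw = raw[1:]
--     if not raw:
--         return None
--     d = 0
--     while d < len(raw) and raw[d].isdigit():
--         d += 1
--     z = 0
--     while z < d and raw[z] == '0':
--         z += 1
--     return raw[max(0, min(z, d - 2)):]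
-- ===== Notes on version B (the rewrite author's own statement) =====
-- stated objective: alternative
-- what changed: B never splits raw into prefix/suffix and builds no strings: it counts the leading digit run (d) and the leading zeros (z) and returns a single slice raw[max(0, min(z, d-2)):], replacing A's accumulate-then-while-trim-then-concatenate scheme by index arithmetic.
import Mathlib
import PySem

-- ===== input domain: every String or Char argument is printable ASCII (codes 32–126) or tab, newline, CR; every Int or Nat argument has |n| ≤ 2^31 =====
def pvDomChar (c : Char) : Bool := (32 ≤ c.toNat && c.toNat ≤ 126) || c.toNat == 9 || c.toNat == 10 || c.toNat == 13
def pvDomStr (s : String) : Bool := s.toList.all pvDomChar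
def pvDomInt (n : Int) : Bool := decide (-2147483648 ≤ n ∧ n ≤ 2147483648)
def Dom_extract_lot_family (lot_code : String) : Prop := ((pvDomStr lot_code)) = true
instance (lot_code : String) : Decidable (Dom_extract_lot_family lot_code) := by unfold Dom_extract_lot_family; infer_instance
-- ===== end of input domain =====

-- B replaces A's split-accumulate-trim-concatenate scheme by index arithmetic: it counts the
-- leading digit run and the leading zeros and returns ONE suffix slice of raw; same cost, no building.

-- ===== PORT A =====
-- the 'for i, c in enumerate(raw)' loop: prefix accumulator, break gives the suffix
def pvA_loop : List Char → List Char → List Char × List Char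
  | [], pre => (pre, [])
  | c :: rest, pre =>
      if PySem.Chars.isdigit c then pvA_loop rest (pre ++ [c]) else (pre, c :: rest)

-- the 'while len(prefix) > 2 and prefix[0] == "0" and prefix[1].isdigit()' loop
def pvA_norm : List Char → List Char
  | c0 :: c1 :: c2 :: rest =>
      if c0 = '0' ∧ PySem.Chars.isdigit c1 = true then pvA_norm (c1 :: c2 :: rest)
      else c0 :: c1 :: c2 :: rest
  | p => p

def extract_lot_family (lot_code : String) : Option String :=
  if lot_code = "" then none
  else
    let raw0 := PySem.Chars.strip lot_code.toList
    -- if raw and raw[0] in 'IABHG': raw = raw[1:]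
    let raw :=
      match raw0 with
      | c :: rest => if c ∈ ['I', 'A', 'B', 'H', 'G'] then rest else c :: rest
      | [] => []
    if raw = [] then none
    else
      let ps := pvA_loop raw []
      some (String.ofList (pvA_norm ps.1 ++ ps.2))

-- ===== PORT B =====
-- Source B: 'while d < len(raw) and raw[d].isdigit(): d += 1' — leading digit count
def pvB_digits : List Char → Nat
  | [] => 0
  | c :: r => if PySem.Chars.isdigit c then pvB_digits r + 1 else 0

-- Source B: 'while z < d and raw[z] == "0": z += 1' — leading zero count, capped at d
def pvB_zeros : List Char → Nat → Nat
  | [], _ => 0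
  | _ :: _, 0 => 0
  | c :: r, Nat.succ d => if c = '0' then pvB_zeros r d + 1 else 0

def extract_lot_family_alt (lot_code : String) : Option String :=
  if lot_code = "" then none
  else
    let raw0 := PySem.Chars.strip lot_code.toList
    let raw :=
      match raw0 with
      | c :: rest => if c ∈ ['I', 'A', 'B', 'H', 'G'] then rest else c :: rest
      | [] => []
    if raw = [] then none
    else
      let d := pvB_digits raw
      let z := pvB_zeros raw d
      -- raw[max(0, min(z, d - 2)):]
      some (String.ofList (PySem.List.slice raw (some (max 0 (min (z : Int) ((d : Int) - 2)))) none))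

-- ===== PRECONDITION & SPEC =====
def Spec_extract_lot_family (lot_code : String) (out : Option String) : Prop := out = extract_lot_family_alt lot_code
instance (lot_code : String) (out : Option String) : Decidable (Spec_extract_lot_family lot_code out) := by unfold Spec_extract_lot_family; infer_instance

-- ===== CLAIM (what is proved, stated in full; the proofs are below) =====
def Claim_equal_extract_lot_family : Prop := ∀ (lot_code : String), Dom_extract_lot_family lot_code → Spec_extract_lot_family lot_code (extract_lot_family lot_code)

-- ===== LEMMAS AND PROOFS =====

lemma pvA_loop_eq (raw acc : List Char) :
    pvA_loop raw acc = (acc ++ raw.takeWhile PySem.Chars.isdigit, raw.dropWhile PySem.Chars.isdigit) := by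
  induction raw generalizing acc with
  | nil => simp [pvA_loop]
  | cons c rest ih =>
      by_cases h : PySem.Chars.isdigit c
      · simp [pvA_loop, h, ih]
      · simp [pvA_loop, h]

-- A's zero-stripping while loop, characterised
lemma pvA_norm_eq (p : List Char) (h : ∀ c ∈ p, PySem.Chars.isdigit c = true) :
    pvA_norm p =
      (if 2 < p.length then
        if 2 ≤ (p.dropWhile (fun c => c == '0')).length then p.dropWhile (fun c => c == '0')
        else p.drop (p.length - 2)
      else p) := by
  fun_induction pvA_norm p with
  | case1 c0 c1 c2 rest hc ih =>
      obtain ⟨h0, h1⟩ := hc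
      subst h0
      rw [ih (fun c hcm => h c (List.mem_cons_of_mem _ hcm))]
      have hdw : List.dropWhile (fun c => c == '0') ('0' :: c1 :: c2 :: rest)
               = List.dropWhile (fun c => c == '0') (c1 :: c2 :: rest) :=
        List.dropWhile_cons_of_pos (by decide)
      set t := c1 :: c2 :: rest with ht
      have htl : t.length = rest.length + 2 := by simp [ht]
      rw [hdw, show ('0' :: t).length = t.length + 1 from List.length_cons ..,
          if_pos (show 2 < t.length + 1 by omega)]
      by_cases hlen : 2 < t.length
      · rw [if_pos hlen]
        by_cases hs : 2 ≤ (t.dropWhile (fun c => c == '0')).length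
        · rw [if_pos hs, if_pos hs]
        · rw [if_neg hs, if_neg hs,
              show t.length + 1 - 2 = (t.length - 2) + 1 from by omega, List.drop_succ_cons]
      · rw [if_neg hlen]
        have hteq : t.length = 2 := by omega
        have hsuf : t.dropWhile (fun c => c == '0') <:+ t := List.dropWhile_suffix _
        have hle : (t.dropWhile (fun c => c == '0')).length ≤ 2 :=
          hteq ▸ hsuf.length_le
        by_cases hs : 2 ≤ (t.dropWhile (fun c => c == '0')).length
        · rw [if_pos hs]
          exact (hsuf.eq_of_length (by omega)).symm
        · rw [if_neg hs, show t.length + 1 - 2 = 1 from by omega,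
              List.drop_succ_cons, List.drop_zero]
  | case2 c0 c1 c2 rest hc =>
      have h1 : PySem.Chars.isdigit c1 = true := h c1 (by simp)
      have h0 : ¬ c0 = '0' := fun hh => hc ⟨hh, h1⟩
      have hd : List.dropWhile (fun c => c == '0') (c0 :: c1 :: c2 :: rest)
              = c0 :: c1 :: c2 :: rest :=
        List.dropWhile_cons_of_neg (by simp [h0])
      rw [if_pos (by simp only [List.length_cons]; omega), hd,
          if_pos (by simp only [List.length_cons]; omega)]
  | case3 p hp =>
      rcases p with _ | ⟨a, _ | ⟨b, _ | ⟨x, t⟩⟩⟩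
      · rfl
      · rfl
      · rfl
      · exact (hp a b x t rfl).elim

lemma pvB_digits_eq (l : List Char) :
    pvB_digits l = (l.takeWhile PySem.Chars.isdigit).length := by
  induction l with
  | nil => rfl
  | cons c r ih =>
      by_cases h : PySem.Chars.isdigit c
      · simp [pvB_digits, h, ih]
      · simp [pvB_digits, h]

lemma pvB_zeros_eq (l : List Char) (n : Nat) :
    pvB_zeros l n = min (l.takeWhile (fun c => c == '0')).length n := by
  induction l generalizing n with
  | nil => simp [pvB_zeros]
  | cons c r ih =>
      cases n with
      | zero => simp [pvB_zeros]
      | succ d =>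
          by_cases h : c = '0'
          · simp [pvB_zeros, h, ih]
          · simp [pvB_zeros, h]

lemma pvTakeWhile_takeWhile_of_imp (p q : Char → Bool) (l : List Char)
    (h : ∀ x, p x = true → q x = true) :
    (l.takeWhile q).takeWhile p = l.takeWhile p := by
  induction l with
  | nil => rfl
  | cons c r ih =>
      by_cases hp : p c = true
      · have hq := h c hp
        simp [hp, hq, ih]
      · by_cases hq : q c = true <;> simp [hp, hq]

-- both algorithms agree once the building prefix has been handled
lemma pvMain_eq (raw : List Char) :
    (if raw = [] then (none : Option String)
     else
       let ps := pvA_loop raw []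
       some (String.ofList (pvA_norm ps.1 ++ ps.2))) =
    (if raw = [] then none
     else
       let d := pvB_digits raw
       let z := pvB_zeros raw d
       some (String.ofList
         (PySem.List.slice raw (some (max 0 (min (z : Int) ((d : Int) - 2)))) none))) := by
  rcases hr : raw with _ | ⟨c, rest⟩
  · rfl
  · simp only [if_neg (by simp : ¬ (c :: rest = []))]
    rw [pvA_loop_eq]
    simp only [List.nil_append]
    set rw0 := c :: rest with hrw
    set pre := rw0.takeWhile PySem.Chars.isdigit with hpre
    set suf := rw0.dropWhile PySem.Chars.isdigit with hsuf
    have hsplit : pre ++ suf = rw0 := List.takeWhile_append_dropWhile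
    have hd : pvB_digits rw0 = pre.length := pvB_digits_eq rw0
    -- the zero run of rw0 lies inside its digit run, so the cap never bites
    have hzpre : rw0.takeWhile (fun c => c == '0') = pre.takeWhile (fun c => c == '0') := by
      rw [hpre,
          pvTakeWhile_takeWhile_of_imp (fun c => c == '0') PySem.Chars.isdigit rw0
            (fun x hx => by
              have : x = '0' := by simpa using hx
              subst this; decide)]
    have hlz_le : (pre.takeWhile (fun c => c == '0')).length ≤ pre.length :=
      (List.takeWhile_prefix _).length_le
    have hz : pvB_zeros rw0 pre.length = (pre.takeWhile (fun c => c == '0')).length := by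
      rw [pvB_zeros_eq, hzpre]; omega
    set lz := (pre.takeWhile (fun c => c == '0')).length with hlz
    congr 2
    rw [pvA_norm_eq pre (fun x hx => List.mem_takeWhile_imp hx)]
    have hdwlen : (pre.dropWhile (fun c => c == '0')).length = pre.length - lz := by
      have := List.takeWhile_append_dropWhile (p := fun c => c == '0') (l := pre)
      have hlen := congrArg List.length this
      simp only [List.length_append] at hlen
      omega
    have hdwdrop : pre.dropWhile (fun c => c == '0') = pre.drop lz := by
      have := List.takeWhile_append_dropWhile (p := fun c => c == '0') (l := pre)
      conv_rhs => rw [← this]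
      rw [List.drop_append_of_le_length (by omega), List.drop_length, List.nil_append]
    -- evaluate B's slice: the start index is a natural number ≤ pre.length
    have hstart0 : (0 : Int) ≤ max 0 (min (lz : Int) ((pre.length : Int) - 2)) := le_max_left _ _
    rw [hd, hz, PySem.List.slice_from _ hstart0]
    by_cases h2 : 2 < pre.length
    · have hmax : (max 0 (min (lz : Int) ((pre.length : Int) - 2))).toNat
                = min lz (pre.length - 2) := by omega
      rw [if_pos h2, hmax]
      by_cases hs : 2 ≤ (pre.dropWhile (fun c => c == '0')).length
      · have hle : lz ≤ pre.length - 2 := by omega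
        rw [if_pos hs, hdwdrop, show min lz (pre.length - 2) = lz from by omega,
            ← List.drop_append_of_le_length (l₂ := suf) (by omega), hsplit]
      · have hge : pre.length - 2 ≤ lz := by omega
        rw [if_neg hs, show min lz (pre.length - 2) = pre.length - 2 from by omega,
            ← List.drop_append_of_le_length (l₂ := suf) (by omega), hsplit]
    · have hmax : (max 0 (min (lz : Int) ((pre.length : Int) - 2))).toNat = 0 := by omega
      rw [if_neg h2, hmax, List.drop_zero, hsplit]

-- ===== VERDICT (by name: the statement is the Claim_ definition above) =====
theorem extract_lot_family_spec : Claim_equal_extract_lot_family := by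
  intro lot_code _
  unfold Spec_extract_lot_family extract_lot_family extract_lot_family_alt
  by_cases he : lot_code = ""
  · simp [he]
  · simp only [he, if_false]
    exact pvMain_eq _
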